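-- pv_equiv track=rewrite | github.com/ParsaHaghighatgoo/Threes-game | three-phase1.py | R_kd
-- ===== SOURCE A (Python) =====
-- def R_kd(mt,k,d):
--     temp = []
--     m = 0
--     m_dic = {}
--     i0 = 0
--     for i in range(len(mt)):
--         temp += [mt[i][0]]
--
--     for j in range(len(temp)):
--         if temp[j] == 0 :
--             m_dic[i0] = j
--             m += 1
--             i0 += 1
--
--     if m == 0 :
--         return mt
--     else :
--         jaygah = k%m
--         mt[m_dic[jaygah]][0] = d
--
--     return mt
-- ===== SOURCE B (Python) =====
-- def R_kd(mt, k, d):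
--     m = sum(1 for row in mt if row[0] == 0)
--     if m == 0:
--         return mt
--     r = m - k % m  # 1-based rank of the target zero counted from the END
--     seen = 0
--     for i in range(len(mt) - 1, -1, -1):
--         if mt[i][0] == 0:
--             seen += 1
--             if seen == r:
--                 mt[i][0] = d
--                 break
--     return mt
-- ===== Notes on version B (the rewrite author's own statement) =====
-- stated objective: alternative
-- what changed: A copies the first column into a temp list and builds an index dictionary of all zero positions, then looks up the (k%m)-th; B counts the zeros in one forward pass and then scans the matrix BACKWARDS, placing d at the (m - k%m)-th zero counted from the end (the same row, reached from the other side), with no temp list and no dictionary.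
import Mathlib
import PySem

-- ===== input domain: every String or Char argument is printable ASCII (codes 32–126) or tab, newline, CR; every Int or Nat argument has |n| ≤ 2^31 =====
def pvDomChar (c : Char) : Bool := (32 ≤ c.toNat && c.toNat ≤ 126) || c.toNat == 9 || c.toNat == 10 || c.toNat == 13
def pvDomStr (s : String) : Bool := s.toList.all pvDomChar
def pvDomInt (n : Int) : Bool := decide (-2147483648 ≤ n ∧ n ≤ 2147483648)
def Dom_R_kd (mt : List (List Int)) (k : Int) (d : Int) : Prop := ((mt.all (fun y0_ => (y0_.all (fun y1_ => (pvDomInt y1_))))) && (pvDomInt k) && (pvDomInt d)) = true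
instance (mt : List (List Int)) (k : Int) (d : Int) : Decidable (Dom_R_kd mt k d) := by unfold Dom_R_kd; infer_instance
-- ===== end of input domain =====

-- B drops A's first-column copy and zero-index dictionary: it counts the zeros forward, then
-- scans the matrix BACKWARDS and places d at the (m - k%m)-th zero counted from the end (the
-- same row reached from the other side); both A and B mutate mt in place in Python — the
-- equivalence proved here is about the returned value.

-- ===== PORT A =====
def R_kd (mt : List (List Int)) (k : Int) (d : Int) : List (List Int) :=
  -- for i in range(len(mt)): temp += [mt[i][0]]
  let temp : List Int := mt.foldl (fun temp row => temp ++ [PySem.List.pyGetD row 0 0]) []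
  -- for j in range(len(temp)): if temp[j] == 0: m_dic[i0] = j; m += 1; i0 += 1
  -- (index loop reading temp[j] and j, ported over enumerate; state is (m, m_dic, i0))
  let st : Int × PySem.Dict Int Int × Int :=
    (PySem.List.enumerate temp 0).foldl
      (fun st jv =>
        if jv.2 = 0 then (st.1 + 1, st.2.1.insert st.2.2 jv.1, st.2.2 + 1) else st)
      (0, PySem.Dict.empty, 0)
  if st.1 = 0 then mt
  else
    let jaygah := PySem.Int.mod k st.1
    -- m_dic[jaygah]: the key is always present (0 ≤ jaygah < m), so no KeyError; .getD 0 is never taken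
    let idx := (st.2.1.get? jaygah).getD 0
    -- mt[idx][0] = d
    PySem.List.pySetD mt idx (PySem.List.pySetD (PySem.List.pyGetD mt idx []) 0 d)

-- ===== PORT B =====
-- Source B's backward index loop 'for i in range(len(mt)-1, -1, -1)' with its break, transcribed as
-- a recursion over the reversed row list carrying the same 'seen' counter; the 'break' leaves
-- the not-yet-visited prefix untouched, and the result is reversed back.
def backPlace (d r : Int) : List (List Int) → Int → List (List Int)
  | [], _ => []
  | row :: rest, seen =>
    if PySem.List.pyGetD row 0 0 = 0 then
      if seen + 1 = r then PySem.List.pySetD row 0 d :: rest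
      else row :: backPlace d r rest (seen + 1)
    else row :: backPlace d r rest seen

def R_kd_alt (mt : List (List Int)) (k : Int) (d : Int) : List (List Int) :=
  -- m = sum(1 for row in mt if row[0] == 0)
  let m : Int := mt.foldl (fun m row => if PySem.List.pyGetD row 0 0 = 0 then m + 1 else m) 0
  if m = 0 then mt
  else (backPlace d (m - PySem.Int.mod k m) mt.reverse 0).reverse

-- ===== PRECONDITION & SPEC =====
-- Pre_ excludes matrices containing an empty row: there the Python A (and B) raises IndexError on row[0].
def Pre_R_kd (mt : List (List Int)) (k : Int) (d : Int) : Prop := ∀ row ∈ mt, row ≠ []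
instance (mt : List (List Int)) (k : Int) (d : Int) : Decidable (Pre_R_kd mt k d) := by unfold Pre_R_kd; infer_instance
def pvWitness_R_kd : List (List Int) × Int × Int := ([[0, 1], [2], [0]], 5, 7)

def Spec_R_kd (mt : List (List Int)) (k : Int) (d : Int) (out : List (List Int)) : Prop := out = R_kd_alt mt k d
instance (mt : List (List Int)) (k : Int) (d : Int) (out : List (List Int)) : Decidable (Spec_R_kd mt k d out) := by unfold Spec_R_kd; infer_instance

-- ===== CLAIM (what is proved, stated in full; the proofs are below) =====
def Claim_equal_R_kd : Prop := ∀ (mt : List (List Int)) (k : Int) (d : Int), Dom_R_kd mt k d → Pre_R_kd mt k d → Spec_R_kd mt k d (R_kd mt k d)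

-- ===== LEMMAS AND PROOFS =====

-- position (row index) of the t-th zero of a list (junk when t is out of range)
def zNth : List Int → Int → Nat
  | [], _ => 0
  | x :: rest, t =>
    if x = 0 then (if t = 0 then 0 else zNth rest (t - 1) + 1) else zNth rest t + 1

-- the first column, as A's temp computes it
def heads (mt : List (List Int)) : List Int := mt.map (fun row => row.getD 0 0)

theorem temp_eq (mt : List (List Int)) :
    mt.foldl (fun temp row => temp ++ [PySem.List.pyGetD row 0 0]) [] = heads mt := by
  rw [PySem.List.foldl_append_singleton_eq_map]
  simp [heads, PySem.List.pyGetD_zero]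

theorem countB_eq (mt : List (List Int)) :
    mt.foldl (fun m row => if PySem.List.pyGetD row 0 0 = 0 then m + 1 else m) 0
      = ((heads mt).countP (fun x => x = 0) : Int) := by
  rw [show (fun (m : Int) (row : List Int) => if PySem.List.pyGetD row 0 0 = 0 then m + 1 else m)
      = (fun m row => if (fun row : List Int => decide (PySem.List.pyGetD row 0 0 = 0)) row = true then m + 1 else m) by
    funext m row; simp]
  rw [PySem.List.foldl_count_if]
  simp [heads, PySem.List.pyGetD_zero, List.countP_map, Function.comp_def]

-- A's fold step (the literal lambda of the port, named for the proofs)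
def foldAstep (st : Int × PySem.Dict Int Int × Int) (jv : Int × Int) : Int × PySem.Dict Int Int × Int :=
  if jv.2 = 0 then (st.1 + 1, st.2.1.insert st.2.2 jv.1, st.2.2 + 1) else st

-- invariant of A's dictionary-building fold: count, i0 and every lookup of the final dict
theorem foldA_spec (l : List Int) : ∀ (s m0 : Int) (D : PySem.Dict Int Int),
    (∀ key ∈ D.keys, key < m0) →
    ((PySem.List.enumerate l s).foldl foldAstep (m0, D, m0)).1
        = m0 + (l.countP (fun x => x = 0) : Int)
    ∧ ((PySem.List.enumerate l s).foldl foldAstep (m0, D, m0)).2.2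
        = m0 + (l.countP (fun x => x = 0) : Int)
    ∧ ∀ q : Int, ((PySem.List.enumerate l s).foldl foldAstep (m0, D, m0)).2.1.get? q
        = if m0 ≤ q ∧ q < m0 + (l.countP (fun x => x = 0) : Int)
          then some (s + (zNth l (q - m0) : Int)) else D.get? q := by
  induction l with
  | nil =>
    intro s m0 D hD
    refine ⟨by simp, by simp, ?_⟩
    intro q
    rw [if_neg (by simp only [List.countP_nil, Nat.cast_zero, add_zero]; omega)]
    simp [PySem.List.enumerate_nil]
  | cons x rest ih =>
    intro s m0 D hD
    rw [PySem.List.enumerate_cons, List.foldl_cons]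
    by_cases hx : x = 0
    · have hstep : foldAstep (m0, D, m0) (s, x) = (m0 + 1, D.insert m0 s, m0 + 1) := by
        simp [foldAstep, hx]
      have hD' : ∀ key ∈ (D.insert m0 s).keys, key < m0 + 1 := by
        intro key hk
        rcases (PySem.Dict.mem_keys_insert D m0 key s).1 hk with h | h
        · omega
        · have := hD key h; omega
      obtain ⟨h1, h2, h3⟩ := ih (s + 1) (m0 + 1) (D.insert m0 s) hD'
      rw [hstep]
      have hc : ((x :: rest).countP (fun x => x = 0) : Int)
          = (rest.countP (fun x => x = 0) : Int) + 1 := by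
        simp [List.countP_cons, hx]
      refine ⟨by rw [h1, hc]; ring, by rw [h2, hc]; ring, ?_⟩
      intro q
      rw [h3 q]
      by_cases hq1 : m0 + 1 ≤ q ∧ q < m0 + 1 + (rest.countP (fun x => x = 0) : Int)
      · rw [if_pos hq1, if_pos (by omega)]
        have hq0 : q - m0 ≠ 0 := by omega
        simp only [zNth, if_pos hx, if_neg hq0]
        have : q - (m0 + 1) = q - m0 - 1 := by ring
        rw [this]
        push_cast
        ring_nf
      · rw [if_neg hq1]
        by_cases hq2 : q = m0
        · subst hq2
          rw [PySem.Dict.get?_insert_self, if_pos (by rw [hc]; omega)]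
          simp [zNth, hx]
        · rw [PySem.Dict.get?_insert_of_ne D s hq2, if_neg (by rw [hc]; omega)]
    · have hstep : foldAstep (m0, D, m0) (s, x) = (m0, D, m0) := by
        simp [foldAstep, hx]
      obtain ⟨h1, h2, h3⟩ := ih (s + 1) m0 D hD
      rw [hstep]
      have hc : ((x :: rest).countP (fun x => x = 0) : Int)
          = (rest.countP (fun x => x = 0) : Int) := by
        simp [List.countP_cons, hx]
      refine ⟨by rw [h1, hc], by rw [h2, hc], ?_⟩
      intro q
      rw [h3 q, hc]
      by_cases hq : m0 ≤ q ∧ q < m0 + (rest.countP (fun x => x = 0) : Int)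
      · rw [if_pos hq, if_pos hq]
        simp only [zNth, if_neg hx]
        push_cast
        ring_nf
      · rw [if_neg hq, if_neg hq]

-- the t-th zero, when it exists, lies inside the list
theorem zNth_lt_length (l : List Int) : ∀ t : Int, 0 ≤ t →
    t < (l.countP (fun x => x = 0) : Int) → zNth l t < l.length := by
  induction l with
  | nil => intro t h0 h; simp at h; omega
  | cons x rest ih =>
    intro t h0 h
    by_cases hx : x = 0
    · by_cases ht : t = 0
      · simp [zNth, hx, ht]
      · have h' : t - 1 < (rest.countP (fun x => x = 0) : Int) := by
          simp [List.countP_cons, hx] at h; push_cast at h ⊢; omega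
        have := ih (t - 1) (by omega) h'
        simp only [zNth, if_pos hx, if_neg ht, List.length_cons]
        omega
    · have h' : t < (rest.countP (fun x => x = 0) : Int) := by
        simpa [List.countP_cons, hx] using h
      have := ih t h0 h'
      simp only [zNth, if_neg hx, List.length_cons]
      omega

theorem zNth_append_lt (l l2 : List Int) : ∀ t : Int, 0 ≤ t →
    t < (l.countP (fun x => x = 0) : Int) → zNth (l ++ l2) t = zNth l t := by
  induction l with
  | nil => intro t h0 h; simp at h; omega
  | cons x rest ih =>
    intro t h0 h
    by_cases hx : x = 0
    · by_cases ht : t = 0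
      · simp [zNth, hx, ht]
      · have h' : t - 1 < (rest.countP (fun x => x = 0) : Int) := by
          simp [List.countP_cons, hx] at h; push_cast at h ⊢; omega
        simp only [List.cons_append, zNth, if_pos hx, if_neg ht, ih (t - 1) (by omega) h']
    · have h' : t < (rest.countP (fun x => x = 0) : Int) := by
        simpa [List.countP_cons, hx] using h
      simp only [List.cons_append, zNth, if_neg hx, ih t h0 h']

theorem zNth_append_full (l l2 : List Int) : ∀ t : Int,
    (l.countP (fun x => x = 0) : Int) ≤ t →
    zNth (l ++ l2) t = l.length + zNth l2 (t - (l.countP (fun x => x = 0) : Int)) := by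
  induction l with
  | nil => intro t h; simp
  | cons x rest ih =>
    intro t h
    by_cases hx : x = 0
    · have hc : ((x :: rest).countP (fun x => x = 0) : Int)
          = (rest.countP (fun x => x = 0) : Int) + 1 := by
        simp [List.countP_cons, hx]
      have ht : t ≠ 0 := by rw [hc] at h; have := Int.natCast_nonneg (rest.countP (fun x => x = 0)); omega
      have := ih (t - 1) (by rw [hc] at h; omega)
      simp only [List.cons_append, zNth, if_pos hx, if_neg ht, this, List.length_cons, hc]
      have : t - 1 - (rest.countP (fun x => x = 0) : Int)
          = t - ((rest.countP (fun x => x = 0) : Int) + 1) := by ring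
      rw [this]; omega
    · have hc : ((x :: rest).countP (fun x => x = 0) : Int)
          = (rest.countP (fun x => x = 0) : Int) := by
        simp [List.countP_cons, hx]
      have := ih t (by rw [hc] at h; exact h)
      simp only [List.cons_append, zNth, if_neg hx, this, List.length_cons, hc]
      omega

-- the (c-1-j)-th zero of the reversed list is the j-th zero of the list, seen from the other end
theorem zNth_reverse (xs : List Int) : ∀ j : Int, 0 ≤ j →
    j < (xs.countP (fun x => x = 0) : Int) →
    zNth xs.reverse ((xs.countP (fun x => x = 0) : Int) - 1 - j)
      = xs.length - 1 - zNth xs j := by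
  induction xs with
  | nil => intro j h0 h; simp at h; omega
  | cons x rest ih =>
    intro j h0 h
    have hrevc : (rest.reverse.countP (fun x => x = 0) : Int)
        = (rest.countP (fun x => x = 0) : Int) := by
      rw [List.countP_reverse]
    by_cases hx : x = 0
    · have hc : (((x :: rest).countP (fun x => x = 0)) : Int)
          = (rest.countP (fun x => x = 0) : Int) + 1 := by
        simp [List.countP_cons, hx]
      by_cases hj : j = 0
      · subst hj
        rw [hc]
        have harg : (rest.countP (fun x => x = 0) : Int) + 1 - 1 - 0
            = (rest.countP (fun x => x = 0) : Int) := by ring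
        rw [harg, List.reverse_cons, zNth_append_full rest.reverse [x] _ (by rw [hrevc])]
        rw [hrevc]
        simp [zNth, hx]
      · have hj1 : 0 ≤ j - 1 := by omega
        have hj2 : j - 1 < (rest.countP (fun x => x = 0) : Int) := by rw [hc] at h; omega
        have harg : ((x :: rest).countP (fun x => x = 0) : Int) - 1 - j
            = (rest.countP (fun x => x = 0) : Int) - 1 - (j - 1) := by rw [hc]; ring
        rw [harg, List.reverse_cons,
          zNth_append_lt rest.reverse [x] _ (by omega) (by rw [hrevc]; omega),
          ih (j - 1) hj1 hj2]
        have hb := zNth_lt_length rest (j - 1) hj1 hj2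
        simp only [zNth, if_pos hx, if_neg hj, List.length_cons]
        omega
    · have hc : (((x :: rest).countP (fun x => x = 0)) : Int)
          = (rest.countP (fun x => x = 0) : Int) := by
        simp [List.countP_cons, hx]
      have hj2 : j < (rest.countP (fun x => x = 0) : Int) := by rw [hc] at h; exact h
      have harg : ((x :: rest).countP (fun x => x = 0) : Int) - 1 - j
          = (rest.countP (fun x => x = 0) : Int) - 1 - j := by rw [hc]
      rw [harg, List.reverse_cons,
        zNth_append_lt rest.reverse [x] _ (by omega) (by rw [hrevc]; omega),
        ih j h0 hj2]
      have hb := zNth_lt_length rest j h0 hj2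
      simp only [zNth, if_neg hx, List.length_cons]
      omega

-- B's backward scan places d at the (r - s)-th (1-based) zero-headed row of the remaining list
theorem backPlace_eq (d : Int) (l : List (List Int)) : ∀ s r : Int, s < r →
    r ≤ s + ((heads l).countP (fun x => x = 0) : Int) →
    backPlace d r l s
      = PySem.List.pySetD l ((zNth (heads l) (r - s - 1) : Nat) : Int)
          (PySem.List.pySetD (PySem.List.pyGetD l ((zNth (heads l) (r - s - 1) : Nat) : Int) []) 0 d) := by
  induction l with
  | nil => intro s r h1 h2; simp [heads] at h2; omega
  | cons row rest ih =>
    intro s r h1 h2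
    have hh : heads (row :: rest) = row.getD 0 0 :: heads rest := rfl
    by_cases hz : row.getD 0 0 = 0
    · have hzE : row[0]?.getD 0 = 0 := by simpa using hz
      have hc : (heads (row :: rest)).countP (fun x => decide (x = 0))
          = (heads rest).countP (fun x => decide (x = 0)) + 1 := by
        rw [hh, List.countP_cons, hz]; simp
      by_cases hs : s + 1 = r
      · have ht : r - s - 1 = 0 := by omega
        have hz0 : zNth (heads (row :: rest)) 0 = 0 := by rw [hh]; simp [zNth, hzE]
        rw [ht, hz0, PySem.List.pySetD_natCast, PySem.List.pyGetD_natCast]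
        simp only [backPlace, PySem.List.pyGetD_zero, hz, hs, eq_self_iff_true, if_true]
        simp [List.getD]
      · have h2' : r ≤ s + 1 + ((heads rest).countP (fun x => x = 0) : Int) := by
          rw [hc] at h2; push_cast at h2 ⊢; omega
        have hrec := ih (s + 1) r (by omega) h2'
        simp only [backPlace, PySem.List.pyGetD_zero, hz, eq_self_iff_true, if_true, if_neg hs]
        rw [hrec, hh]
        have harg : r - (s + 1) - 1 = r - s - 1 - 1 := by ring
        have ht0 : r - s - 1 ≠ 0 := by omega
        rw [harg]
        simp only [zNth, hz, eq_self_iff_true, if_true, if_neg ht0]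
        rw [PySem.List.pySetD_natCast, PySem.List.pySetD_natCast,
          PySem.List.pyGetD_natCast, PySem.List.pyGetD_natCast]
        simp [List.set_cons_succ, List.getD_cons_succ]
    · have hdf : decide (row.getD 0 0 = 0) = false := decide_eq_false hz
      have hc : (heads (row :: rest)).countP (fun x => decide (x = 0))
          = (heads rest).countP (fun x => decide (x = 0)) := by
        rw [hh, List.countP_cons, hdf]; simp
      have h2' : r ≤ s + ((heads rest).countP (fun x => x = 0) : Int) := by
        rw [hc] at h2; exact h2
      have hrec := ih s r h1 h2'
      simp only [backPlace, PySem.List.pyGetD_zero, if_neg hz]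
      rw [hrec, hh]
      simp only [zNth, if_neg hz]
      rw [PySem.List.pySetD_natCast, PySem.List.pySetD_natCast,
        PySem.List.pyGetD_natCast, PySem.List.pyGetD_natCast]
      simp [List.set_cons_succ, List.getD_cons_succ]

-- setting in the reversed list is setting at the mirrored index
theorem set_reverse_eq {α : Type} (l : List α) (i : Nat) (x : α) (h : i < l.length) :
    (l.reverse.set i x).reverse = l.set (l.length - 1 - i) x := by
  apply List.ext_getElem
  · simp
  · intro n h1 h2
    have hn : n < l.length := by simpa using h2
    rw [List.getElem_reverse, List.getElem_set, List.getElem_set]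
    by_cases hc : l.length - 1 - i = n
    · rw [if_pos hc, if_pos (by simp; omega)]
    · rw [if_neg hc, if_neg (by simp; omega), List.getElem_reverse]
      have : l.length - 1 - ((l.reverse.set i x).length - 1 - n) = n := by simp; omega
      simp only [this]

theorem heads_reverse (mt : List (List Int)) : heads mt.reverse = (heads mt).reverse := by
  simp [heads, List.map_reverse]

-- ===== VERDICT (by name: the statement is the Claim_ definition above) =====
theorem R_kd_spec : Claim_equal_R_kd := by
  intro mt k d _ _
  unfold Spec_R_kd R_kd R_kd_alt
  dsimp only
  rw [show (fun (st : Int × PySem.Dict Int Int × Int) (jv : Int × Int) =>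
        if jv.2 = 0 then (st.1 + 1, st.2.1.insert st.2.2 jv.1, st.2.2 + 1) else st)
      = foldAstep from rfl]
  rw [temp_eq, countB_eq]
  obtain ⟨h1, h2, h3⟩ := foldA_spec (heads mt) 0 0 PySem.Dict.empty (by simp [PySem.Dict.empty, PySem.Dict.keys])
  set c : Int := ((heads mt).countP (fun x => x = 0) : Int) with hc
  rw [h1]
  by_cases h0 : c = 0
  · simp [h0]
  · have hnn : (0:Int) ≤ c := by rw [hc]; exact Int.natCast_nonneg _
    have hcpos : (0:Int) < c := by omega
    simp only [zero_add]
    rw [if_neg h0, if_neg h0]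
    have hq0 : 0 ≤ PySem.Int.mod k c := PySem.Int.mod_nonneg k hcpos
    have hqc : PySem.Int.mod k c < c := PySem.Int.mod_lt k hcpos
    set q : Int := PySem.Int.mod k c with hqdef
    rw [h3 q, if_pos ⟨hq0, by omega⟩]
    simp only [Option.getD_some, sub_zero, zero_add]
    set p : Nat := zNth (heads mt) q with hpdef
    have hn : (heads mt).length = mt.length := by simp [heads]
    have hqc' : q < ((heads mt).countP (fun x => x = 0) : Int) := by rw [← hc]; exact hqc
    have hpn : p < mt.length := by
      have := zNth_lt_length (heads mt) q hq0 hqc'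
      rw [hn] at this; exact this
    have hcr : ((heads mt.reverse).countP (fun x => x = 0) : Int) = c := by
      rw [heads_reverse, List.countP_reverse, hc]
    rw [backPlace_eq d mt.reverse 0 (c - q) (by omega) (by rw [hcr]; omega)]
    simp only [sub_zero]
    have hpr : zNth (heads mt.reverse) (c - q - 1) = mt.length - 1 - p := by
      rw [heads_reverse,
        show c - q - 1 = ((heads mt).countP (fun x => x = 0) : Int) - 1 - q from by rw [← hc]; ring,
        zNth_reverse (heads mt) q hq0 hqc', hn, hpdef]
    rw [hpr, PySem.List.pySetD_natCast, PySem.List.pySetD_natCast,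
      PySem.List.pyGetD_natCast, PySem.List.pyGetD_natCast]
    have hidx : mt.length - 1 - (mt.length - 1 - p) = p := by omega
    rw [List.getD_reverse _ (by omega), hidx, set_reverse_eq mt _ _ (by omega), hidx]
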